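-- pv_equiv track=rewrite | github.com/remothuman/advent-2025 | 6/day6.py | convert_problem_to_correct_format
-- ===== SOURCE A (Python) =====
-- def convert_problem_to_correct_format(problem:list[str]):
--     longest_digit_length = max(len(str(number)) for number in problem)
--
--     out = []
--
--     for digit_col in range(longest_digit_length, 0, -1):
--         built_number = ""
--         for number in problem[:-1]: # exclude the operator row
--             if len(str(number)) >= digit_col:
--                 built_number += str(number[digit_col-1])
--             else:
--                 built_number += ""
--         out.append(built_number)
--
--     out.append(problem[-1]) # add the operator row
--     return out
-- ===== SOURCE B (Python) =====
-- def convert_problem_to_correct_format(problem: list[str]):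
--     longest = max(len(number) for number in problem)
--     cols = [[] for _ in range(longest)]
--     for number in problem[:-1]:  # exclude the operator row
--         for c in range(len(number)):
--             cols[longest - 1 - c].append(number[c])
--     out = [''.join(col) for col in cols]
--     out.append(problem[-1])  # add the operator row
--     return out
-- ===== Notes on version B (the rewrite author's own statement) =====
-- stated objective: alternative
-- what changed: A gathers each output row with a fresh pass over the rows for every column (column-major gather); B preallocates one bucket per column and scatters each number's characters into the buckets in a single row-major pass (inverse loop nesting).
import Mathlib
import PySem

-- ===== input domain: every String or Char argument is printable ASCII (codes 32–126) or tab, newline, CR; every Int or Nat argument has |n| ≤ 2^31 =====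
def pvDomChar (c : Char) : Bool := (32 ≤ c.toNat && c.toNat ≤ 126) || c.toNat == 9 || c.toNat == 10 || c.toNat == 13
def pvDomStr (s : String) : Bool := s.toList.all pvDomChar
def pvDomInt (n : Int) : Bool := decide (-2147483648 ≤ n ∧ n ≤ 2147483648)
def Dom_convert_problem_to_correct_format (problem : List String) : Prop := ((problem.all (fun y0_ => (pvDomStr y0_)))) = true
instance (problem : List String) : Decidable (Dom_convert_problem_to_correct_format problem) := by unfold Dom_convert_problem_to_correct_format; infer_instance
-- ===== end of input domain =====

-- B replaces A's column-major gather (one pass over the rows per output column) by a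
-- row-major scatter into preallocated per-column buckets joined at the end (objective: alternative decomposition).

-- shared helper: the one-character string s[i] (Python's indexing of a str; both programs only use it in range)
def pvCharAt (s : String) (i : Int) : String :=
  match PySem.Str.pyGet? s i with
  | some c => String.ofList [c]
  | none => ""

-- ===== PORT A =====
def convert_problem_to_correct_format (problem : List String) : List String :=
  let longest := (PySem.List.max? (problem.map (fun number => PySem.Str.len number)) (fun x => x)).getD 0
  let out := (PySem.List.pyRange longest 0 (-1)).foldl (fun out digit_col =>
    out ++ [(PySem.List.slice problem none (some (-1))).foldl
      (fun built number =>
        if digit_col ≤ PySem.Str.len number then built ++ pvCharAt number (digit_col - 1)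
        else built ++ "") ""]) []
  out ++ [(PySem.List.pyGet? problem (-1)).getD ""]

-- ===== PORT B =====
def convert_problem_to_correct_format_alt (problem : List String) : List String :=
  let longest := (PySem.List.max? (problem.map (fun number => PySem.Str.len number)) (fun x => x)).getD 0
  let cols : List (List String) := (List.range longest.toNat).map (fun _ => [])
  let cols := (PySem.List.slice problem none (some (-1))).foldl (fun cols number =>
    (PySem.List.pyRange 0 (PySem.Str.len number) 1).foldl (fun cols c =>
      PySem.List.pySetD cols (longest - 1 - c)
        (PySem.List.pyGetD cols (longest - 1 - c) [] ++ [pvCharAt number c])) cols) cols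
  cols.map (fun col => PySem.Str.join "" col) ++ [(PySem.List.pyGet? problem (-1)).getD ""]

-- ===== PRECONDITION & SPEC =====
-- Pre_ excludes only the empty list, on which Python A raises ValueError (max() of an empty sequence).
def Pre_convert_problem_to_correct_format (problem : List String) : Prop := problem ≠ []
instance (problem : List String) : Decidable (Pre_convert_problem_to_correct_format problem) := by unfold Pre_convert_problem_to_correct_format; infer_instance
def pvWitness_convert_problem_to_correct_format : List String := ["123", "45", "+"]

def Spec_convert_problem_to_correct_format (problem : List String) (out : List String) : Prop := out = convert_problem_to_correct_format_alt problem
instance (problem : List String) (out : List String) : Decidable (Spec_convert_problem_to_correct_format problem out) := by unfold Spec_convert_problem_to_correct_format; infer_instance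

-- ===== CLAIM (what is proved, stated in full; the proofs are below) =====
def Claim_equal_convert_problem_to_correct_format : Prop := ∀ (problem : List String), Dom_convert_problem_to_correct_format problem → Pre_convert_problem_to_correct_format problem → Spec_convert_problem_to_correct_format problem (convert_problem_to_correct_format problem)

-- ===== LEMMAS AND PROOFS =====

-- the string of column `col` read across `nums` (one output row of A)
def pvRowOf (nums : List String) (col : Int) : String :=
  nums.foldl (fun s n => s ++ pvCharAt n col) ""

-- the bucket of column `col` as B fills it (one one-character string per long-enough number)
def pvBucketOf (nums : List String) (col : Int) : List String :=
  nums.foldl (fun l n => l ++ (if col < PySem.Str.len n then [pvCharAt n col] else [])) []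

theorem pvCharAt_of_ge (n : String) (i : Int) (h0 : 0 ≤ i) (h : PySem.Str.len n ≤ i) :
    pvCharAt n i = "" := by
  unfold pvCharAt
  rw [PySem.Str.len_eq] at h
  have hnone : PySem.Str.pyGet? n i = none := by
    rw [PySem.Str.pyGet?_eq, PySem.Chars.pyGet?_eq_listPyGet?, PySem.List.pyGet?_eq_none_iff]
    simp only [PySem.Raise.InRange, not_and, not_lt]
    intro _
    omega
  rw [hnone]

-- pull the accumulator out of an append-fold (strings)
theorem pvFoldl_pull (nums : List String) (h : String → String) (s0 : String) :
    nums.foldl (fun s n => s ++ h n) s0 = s0 ++ nums.foldl (fun s n => s ++ h n) "" := by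
  induction nums generalizing s0 with
  | nil => simp
  | cons n rest ih =>
    simp only [List.foldl_cons]
    rw [ih (s0 ++ h n), ih ("" ++ h n), String.empty_append, String.append_assoc]

-- pull the accumulator out of an append-fold (lists of strings)
theorem pvFoldl_pull_list (nums : List String) (h : String → List String) (l0 : List String) :
    nums.foldl (fun l n => l ++ h n) l0 = l0 ++ nums.foldl (fun l n => l ++ h n) [] := by
  induction nums generalizing l0 with
  | nil => simp
  | cons n rest ih =>
    simp only [List.foldl_cons]
    rw [ih (l0 ++ h n), ih ([] ++ h n), List.nil_append, List.append_assoc]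

theorem pvRowOf_cons (n : String) (rest : List String) (col : Int) :
    pvRowOf (n :: rest) col = pvCharAt n col ++ pvRowOf rest col := by
  unfold pvRowOf
  simp only [List.foldl_cons, String.empty_append]
  exact pvFoldl_pull rest _ _

theorem pvBucketOf_cons (n : String) (rest : List String) (col : Int) :
    pvBucketOf (n :: rest) col
      = (if col < PySem.Str.len n then [pvCharAt n col] else []) ++ pvBucketOf rest col := by
  unfold pvBucketOf
  simp only [List.foldl_cons, List.nil_append]
  exact pvFoldl_pull_list rest _ _

-- ''.join distributes over cons when the separator is empty
theorem pvJoin_cons (p : String) (rest : List String) :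
    PySem.Str.join "" (p :: rest) = p ++ PySem.Str.join "" rest := by
  apply String.toList_inj.mp
  cases rest with
  | nil =>
    simp [PySem.Str.toList_join, PySem.Chars.join_singleton, PySem.Chars.join_nil]
  | cons q t =>
    simp [PySem.Str.toList_join, PySem.Chars.join_cons_cons]

-- joining B's bucket for a column gives A's row for that column
theorem pvJoin_bucket (nums : List String) (col : Int) (h0 : 0 ≤ col) :
    PySem.Str.join "" (pvBucketOf nums col) = pvRowOf nums col := by
  induction nums with
  | nil => simp [pvBucketOf, pvRowOf, PySem.Str.join]
  | cons n rest ih =>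
    rw [pvBucketOf_cons, pvRowOf_cons]
    by_cases h : col < PySem.Str.len n
    · rw [if_pos h, List.singleton_append, pvJoin_cons, ih]
    · rw [if_neg h, List.nil_append, ih, pvCharAt_of_ge n col h0 (by omega), String.empty_append]

-- A's inner loop builds exactly pvRowOf at column d-1
theorem pvA_row (d : Int) (hd : 1 ≤ d) (nums : List String) (s0 : String) :
    nums.foldl (fun built number =>
        if d ≤ PySem.Str.len number then built ++ pvCharAt number (d - 1)
        else built ++ "") s0
      = nums.foldl (fun s n => s ++ pvCharAt n (d - 1)) s0 := by
  have hf : (fun built number =>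
        if d ≤ PySem.Str.len number then built ++ pvCharAt number (d - 1)
        else built ++ "") = (fun s n => s ++ pvCharAt n (d - 1)) := by
    funext s n
    by_cases h : d ≤ PySem.Str.len n
    · rw [if_pos h]
    · rw [if_neg h, pvCharAt_of_ge n (d - 1) (by omega) (by omega)]
  rw [hf]

-- B's inner loop: scattering the characters of one number into the buckets
theorem pvB_inner (n : String) (Lint : Int) (m : Nat) (out : List (List String))
    (hlen : out.length = Lint.toNat) (hm : (m : Int) ≤ Lint) :
    ((List.range m).map (fun (k : Nat) => (k : Int))).foldl
        (fun o c => PySem.List.pySetD o (Lint - 1 - c)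
          (PySem.List.pyGetD o (Lint - 1 - c) [] ++ [pvCharAt n c])) out
      = out.mapIdx (fun i l =>
          l ++ (if Lint - 1 - (i : Int) < (m : Int) then [pvCharAt n (Lint - 1 - (i : Int))] else [])) := by
  induction m with
  | zero =>
    simp only [List.range_zero, List.map_nil, List.foldl_nil]
    apply List.ext_getElem (by simp)
    intro i h1 h2
    have hi : i < out.length := by simpa using h1
    have hc : ¬ (Lint - 1 - (i : Int) < ((0 : Nat) : Int)) := by push_cast; omega
    rw [List.getElem_mapIdx, if_neg hc, List.append_nil]
  | succ m ih =>
    have hm' : (m : Int) ≤ Lint := by push_cast at hm ⊢; omega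
    rw [List.range_succ, List.map_append, List.foldl_append, ih hm']
    simp only [List.map_cons, List.map_nil, List.foldl_cons, List.foldl_nil]
    set p : Int := Lint - 1 - (m : Int) with hp
    have hp0 : 0 ≤ p := by omega
    have hplen : p.toNat < out.length := by omega
    rw [PySem.List.pySetD_of_nonneg _ _ hp0,
        PySem.List.pyGetD_eq_getElem _ _ hp0 (by simp [List.length_mapIdx]; omega)]
    apply List.ext_getElem (by simp)
    intro i h1 h2
    have hi : i < out.length := by simpa using h1
    rw [List.getElem_set]
    by_cases hip : p.toNat = i
    · subst hip
      have heq : Lint - 1 - ((p.toNat : Nat) : Int) = (m : Int) := by omega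
      rw [if_pos rfl]
      simp only [List.getElem_mapIdx, heq]
      rw [if_neg (by omega : ¬ (m : Int) < (m : Int)), List.append_nil,
          if_pos (by push_cast; omega : (m : Int) < ((m + 1 : Nat) : Int))]
    · rw [if_neg hip]
      simp only [List.getElem_mapIdx]
      have hne : Lint - 1 - (i : Int) ≠ (m : Int) := by omega
      by_cases hlt : Lint - 1 - (i : Int) < (m : Int)
      · rw [if_pos hlt, if_pos (by push_cast; omega)]
      · rw [if_neg hlt, if_neg (by push_cast; omega)]

-- B's outer loop: every bucket i ends as pvBucketOf nums (Lint - 1 - i)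
theorem pvB_outer (nums : List String) (Lint : Int) (out : List (List String))
    (hlen : out.length = Lint.toNat)
    (hb : ∀ n ∈ nums, PySem.Str.len n ≤ Lint) :
    nums.foldl (fun out number =>
        (PySem.List.pyRange 0 (PySem.Str.len number) 1).foldl (fun out c =>
          PySem.List.pySetD out (Lint - 1 - c)
            (PySem.List.pyGetD out (Lint - 1 - c) [] ++ [pvCharAt number c])) out) out
      = out.mapIdx (fun i l => l ++ pvBucketOf nums (Lint - 1 - (i : Int))) := by
  induction nums generalizing out with
  | nil =>
    apply List.ext_getElem (by simp)
    intro i h1 h2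
    simp [List.getElem_mapIdx, pvBucketOf]
  | cons n rest ih =>
    simp only [List.foldl_cons]
    have hn : PySem.Str.len n ≤ Lint := hb n (List.mem_cons_self ..)
    have hrange : PySem.List.pyRange 0 (PySem.Str.len n) 1
        = (List.range n.toList.length).map (fun (k : Nat) => (k : Int)) := by
      rw [PySem.Str.len_eq]
      exact_mod_cast PySem.List.pyRange_zero_nat n.toList.length
    rw [hrange, pvB_inner n Lint n.toList.length out hlen (by rw [← PySem.Str.len_eq]; exact hn)]
    rw [ih _ (by simp [hlen]) (fun x hx => hb x (List.mem_cons_of_mem _ hx))]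
    apply List.ext_getElem (by simp)
    intro i h1 h2
    have hi : i < out.length := by simpa using h1
    have hlen' : PySem.Str.len n = (n.toList.length : Int) := PySem.Str.len_eq n
    simp only [List.getElem_mapIdx, pvBucketOf_cons, List.append_assoc, hlen']

-- ===== VERDICT (by name: the statement is the Claim_ definition above) =====
theorem convert_problem_to_correct_format_spec : Claim_equal_convert_problem_to_correct_format := by
  intro problem _ hpre
  unfold Spec_convert_problem_to_correct_format
  unfold convert_problem_to_correct_format convert_problem_to_correct_format_alt
  obtain ⟨M, hM⟩ : ∃ M, PySem.List.max? (problem.map (fun number => PySem.Str.len number)) (fun x => x) = some M := by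
    rcases Option.eq_none_or_eq_some (PySem.List.max? (problem.map (fun number => PySem.Str.len number)) (fun x => x)) with h | h
    · rw [PySem.List.max?_eq_none_iff] at h
      simp at h
      exact absurd h hpre
    · exact h
  have hM0 : 0 ≤ M := by
    have := PySem.List.max?_mem hM
    simp only [List.mem_map] at this
    obtain ⟨s, _, hs⟩ := this
    rw [← hs, PySem.Str.len_eq]
    positivity
  have hbound : ∀ n ∈ problem, PySem.Str.len n ≤ M := by
    intro n hn
    exact PySem.List.max?_isMax hM (PySem.Str.len n) (List.mem_map_of_mem hn)
  simp only [hM, Option.getD_some, PySem.List.slice_to_neg_one]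
  congr 1
  -- A's column list equals B's joined bucket list
  have hA : (PySem.List.pyRange M 0 (-1)).foldl (fun out digit_col =>
      out ++ [(problem.dropLast).foldl
        (fun built number =>
          if digit_col ≤ PySem.Str.len number then built ++ pvCharAt number (digit_col - 1)
          else built ++ "") ""]) []
      = (PySem.List.pyRange M 0 (-1)).map (fun d => pvRowOf problem.dropLast (d - 1)) := by
    rw [PySem.List.foldl_append_singleton_eq_map
      (fun d => (problem.dropLast).foldl
        (fun built number =>
          if d ≤ PySem.Str.len number then built ++ pvCharAt number (d - 1)
          else built ++ "") "")]
    rw [List.nil_append]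
    apply List.map_congr_left
    intro d hd
    have hd1 : 1 ≤ d := by
      rw [PySem.List.mem_pyRange_neg_one] at hd
      omega
    rw [pvA_row d hd1]
    rfl
  rw [hA, pvB_outer problem.dropLast M ((List.range M.toNat).map (fun _ => []))
    (by simp) (fun n hn => hbound n (List.dropLast_subset _ hn))]
  rw [PySem.List.pyRange_neg_one]
  apply List.ext_getElem (by simp)
  intro i h1 h2
  have hi : i < M.toNat := by simpa [List.length_mapIdx] using h2
  have harith : M - (i : Int) - 1 = M - 1 - (i : Int) := by omega
  simp only [List.getElem_map, List.getElem_mapIdx, List.getElem_range, List.nil_append, harith]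
  rw [pvJoin_bucket _ _ (by omega)]
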